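-- pv_equiv track=rewrite | github.com/mukesh-Guntumadugu/Dance_Dance_Prompting | sort_and_analyze_beatmaps.py | is_candle
-- ===== SOURCE A (Python) =====
-- def is_candle(active_list: list[list[int]]) -> bool:
--     """Single → jump → single pattern (or jump → single → jump)."""
--     if len(active_list) < 3:
--         return False
--     counts = [len(a) for a in active_list]
--     for i in range(len(counts) - 2):
--         triplet = counts[i:i+3]
--         if triplet == [1, 2, 1] or triplet == [2, 1, 2]:
--             return True
--     return False
-- ===== SOURCE B (Python) =====
-- def is_candle(active_list: list[list[int]]) -> bool:
--     """Single → jump → single pattern (or jump → single → jump)."""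
--     prev = 0   # previous count if it was 1 or 2, else 0
--     run = 0    # length of the current strictly-alternating run of 1/2 counts
--     for a in active_list:
--         c = len(a)
--         if c == 1 or c == 2:
--             run = run + 1 if prev != 0 and c != prev else 1
--             if run >= 3:
--                 return True
--             prev = c
--         else:
--             prev = 0
--             run = 0
--     return False
-- ===== Notes on version B (the rewrite author's own statement) =====
-- stated objective: alternative
-- what changed: Replaces the sliding-window triplet comparison with a single-pass finite-state scan: B maintains only the previous count and the length of the current strictly-alternating run of 1/2 counts, returning as soon as that run reaches 3; no counts list or window is ever materialised.
import Mathlib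
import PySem

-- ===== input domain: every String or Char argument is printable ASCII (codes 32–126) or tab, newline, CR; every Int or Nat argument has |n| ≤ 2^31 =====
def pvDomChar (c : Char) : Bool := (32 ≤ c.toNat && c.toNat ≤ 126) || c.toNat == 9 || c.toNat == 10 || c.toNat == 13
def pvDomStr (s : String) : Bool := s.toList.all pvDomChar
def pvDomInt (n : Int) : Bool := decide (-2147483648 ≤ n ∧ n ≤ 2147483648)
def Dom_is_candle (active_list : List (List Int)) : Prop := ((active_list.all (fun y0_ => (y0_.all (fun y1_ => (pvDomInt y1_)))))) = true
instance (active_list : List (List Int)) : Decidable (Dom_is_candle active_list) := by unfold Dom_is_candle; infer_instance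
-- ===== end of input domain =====

-- B replaces A's sliding-window triplet comparisons with a single-pass finite-state scan
-- (previous count + length of the current strictly-alternating 1/2 run), same cost (alternative).

-- ===== PORT A =====
def is_candle (active_list : List (List Int)) : Bool :=
  if active_list.length < 3 then false
  else
    let counts : List Int := active_list.map (fun a => (a.length : Int))
    (PySem.List.pyRange 0 ((counts.length : Int) - 2) 1).foldl
      (fun acc i =>
        let triplet := PySem.List.slice counts (some i) (some (i + 3))
        acc || (triplet == [(1 : Int), 2, 1] || triplet == [(2 : Int), 1, 2]))
      false

-- ===== PORT B =====
-- loop body of B; state = (found, prev, run); early 'return True' is the found flag freezing the state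
def pvStepB (s : Bool × Int × Int) (a : List Int) : Bool × Int × Int :=
  if s.1 then s
  else
    let c : Int := (a.length : Int)
    if c = 1 ∨ c = 2 then
      let run : Int := if s.2.1 ≠ 0 ∧ c ≠ s.2.1 then s.2.2 + 1 else 1
      if run ≥ 3 then (true, c, run) else (false, c, run)
    else (false, 0, 0)

def is_candle_alt (active_list : List (List Int)) : Bool :=
  (active_list.foldl pvStepB (false, 0, 0)).1

-- ===== PRECONDITION & SPEC =====
def Spec_is_candle (active_list : List (List Int)) (out : Bool) : Prop := out = is_candle_alt active_list
instance (active_list : List (List Int)) (out : Bool) : Decidable (Spec_is_candle active_list out) := by unfold Spec_is_candle; infer_instance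

-- ===== CLAIM (what is proved, stated in full; the proofs are below) =====
def Claim_equal_is_candle : Prop := ∀ (active_list : List (List Int)), Dom_is_candle active_list → Spec_is_candle active_list (is_candle active_list)

-- ===== LEMMAS AND PROOFS =====

-- reference predicate on the counts list: some consecutive triplet is 1,2,1 or 2,1,2
def pvHasPat : List Int → Bool
  | a :: b :: c :: t =>
      (decide (a = 1 ∧ b = 2 ∧ c = 1)) || (decide (a = 2 ∧ b = 1 ∧ c = 2)) || pvHasPat (b :: c :: t)
  | _ => false

-- B's loop body, unrolled as a recursion on the counts list (not-yet-found states only)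
def pvG : Int → Int → List Int → Bool
  | _, _, [] => false
  | p, r, c :: t =>
      if c = 1 ∨ c = 2 then
        let r' : Int := if p ≠ 0 ∧ c ≠ p then r + 1 else 1
        if r' ≥ 3 then true else pvG c r' t
      else pvG 0 0 t

lemma pv_foldl_or {α : Type} (l : List α) (p : α → Bool) (acc : Bool) :
    l.foldl (fun a x => a || p x) acc = (acc || l.any p) := by
  induction l generalizing acc with
  | nil => simp
  | cons h t ih => simp [List.foldl_cons, ih, Bool.or_assoc]

-- the common characterisation: some window of three consecutive sublists has counts 1,2,1 or 2,1,2
def pvP (al : List (List Int)) : Prop :=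
  ∃ j : Nat, ((al.drop j).take 3).map (fun a => (a.length : Int)) = [1, 2, 1]
           ∨ ((al.drop j).take 3).map (fun a => (a.length : Int)) = [2, 1, 2]

lemma pvP_length {al : List (List Int)} (h : pvP al) : 3 ≤ al.length := by
  obtain ⟨j, hj⟩ := h
  have hlen : ((al.drop j).take 3).length = 3 := by
    rcases hj with hj | hj <;> simpa using congrArg List.length hj
  simp only [List.length_take, List.length_drop] at hlen
  omega

lemma pv_A_iff (al : List (List Int)) : is_candle al = true ↔ pvP al := by
  unfold is_candle
  split_ifs with hlt
  · simp only [false_iff]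
    intro h
    exact absurd (pvP_length h) (by omega)
  · rw [pv_foldl_or]
    simp only [Bool.false_or, List.any_eq_true]
    constructor
    · rintro ⟨i, hi, hp⟩
      rw [PySem.List.mem_pyRange_iff_of_pos (by norm_num)] at hi
      obtain ⟨h0, hub, -⟩ := hi
      refine ⟨i.toNat, ?_⟩
      rw [PySem.List.slice_toNat _ h0 (by omega)] at hp
      have h3 : (i + 3).toNat - i.toNat = 3 := by omega
      rw [h3] at hp
      simpa [beq_iff_eq] using hp
    · rintro ⟨j, hj⟩
      have hn : 3 ≤ al.length := pvP_length ⟨j, hj⟩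
      have hjb : j + 3 ≤ al.length := by
        have hlen : ((al.drop j).take 3).length = 3 := by
          rcases hj with hj | hj <;> simpa using congrArg List.length hj
        simp only [List.length_take, List.length_drop] at hlen
        omega
      refine ⟨(j : Int), ?_, ?_⟩
      · rw [PySem.List.mem_pyRange_iff_of_pos (by norm_num)]
        refine ⟨by positivity, ?_, by simp⟩
        simp only [List.length_map]
        omega
      · rw [PySem.List.slice_toNat _ (by positivity) (by positivity)]
        have h3 : ((j : Int) + 3).toNat - (j : Int).toNat = 3 := by omega
        have hjn : ((j : Int)).toNat = j := by omega
        rw [h3, hjn]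
        simpa [beq_iff_eq] using hj

-- one unfolding step when the leading triplet cannot match
lemma pvHasPat_step (a b c : Int) (t : List Int)
    (h1 : ¬ (a = 1 ∧ b = 2 ∧ c = 1)) (h2 : ¬ (a = 2 ∧ b = 1 ∧ c = 2)) :
    pvHasPat (a :: b :: c :: t) = pvHasPat (b :: c :: t) := by
  simp [pvHasPat, h1, h2]

lemma pvHasPat_cons_nonpat (c : Int) (t : List Int) (h1 : c ≠ 1) (h2 : c ≠ 2) :
    pvHasPat (c :: t) = pvHasPat t := by
  match t with
  | [] => rfl
  | [x] => rfl
  | x :: y :: t' => exact pvHasPat_step c x y t' (by tauto) (by tauto)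

lemma pvHasPat_cons_mid (a c : Int) (t : List Int) (h1 : c ≠ 1) (h2 : c ≠ 2) :
    pvHasPat (a :: c :: t) = pvHasPat (c :: t) := by
  match t with
  | [] => rfl
  | x :: t' => exact pvHasPat_step a c x t' (by tauto) (by tauto)

lemma pvHasPat_cons_same (p : Int) (t : List Int) :
    pvHasPat (p :: p :: t) = pvHasPat (p :: t) := by
  match t with
  | [] => rfl
  | x :: t' =>
    exact pvHasPat_step p p x t' (by rintro ⟨h1, h2, -⟩; omega) (by rintro ⟨h1, h2, -⟩; omega)

-- pvHasPat on the counts list says exactly pvP's window condition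
lemma pv_hasPat_iff (cs : List Int) :
    pvHasPat cs = true ↔
      ∃ j : Nat, (cs.drop j).take 3 = [1, 2, 1] ∨ (cs.drop j).take 3 = [2, 1, 2] := by
  induction cs with
  | nil =>
    simp only [pvHasPat, Bool.false_eq_true, false_iff]
    rintro ⟨j, hj | hj⟩ <;> simp at hj
  | cons a t ih =>
    rcases t with _ | ⟨b, _ | ⟨c, t2⟩⟩
    · simp only [pvHasPat, Bool.false_eq_true, false_iff]
      rintro ⟨j, hj | hj⟩ <;>
      · have := congrArg List.length hj
        simp only [List.length_take, List.length_drop] at this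
        simp at this
        omega
    · simp only [pvHasPat, Bool.false_eq_true, false_iff]
      rintro ⟨j, hj | hj⟩ <;>
      · have := congrArg List.length hj
        simp only [List.length_take, List.length_drop] at this
        simp at this
        omega
    · simp only [pvHasPat, Bool.or_eq_true, decide_eq_true_eq]
      rw [ih]
      constructor
      · rintro ((h | h) | ⟨j, hj⟩)
        · exact ⟨0, Or.inl (by simp [h.1, h.2.1, h.2.2])⟩
        · exact ⟨0, Or.inr (by simp [h.1, h.2.1, h.2.2])⟩
        · exact ⟨j + 1, by simpa using hj⟩
      · rintro ⟨j, hj⟩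
        match j with
        | 0 => rcases hj with hj | hj <;> simp_all
        | j + 1 => exact Or.inr ⟨j, by simpa using hj⟩

-- unfolding equations for pvG on a cons
lemma pvG_cons_non (p r c : Int) (t : List Int) (h : ¬ (c = 1 ∨ c = 2)) :
    pvG p r (c :: t) = pvG 0 0 t := by
  simp [pvG, h]

lemma pvG_cons_new (p r c : Int) (t : List Int) (hc : c = 1 ∨ c = 2)
    (h : ¬ (p ≠ 0 ∧ c ≠ p)) :
    pvG p r (c :: t) = pvG c 1 t := by
  simp only [pvG, if_pos hc, if_neg h]
  norm_num

lemma pvG_cons_inc (p r c : Int) (t : List Int) (hc : c = 1 ∨ c = 2)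
    (h : p ≠ 0 ∧ c ≠ p) :
    pvG p r (c :: t) = if r + 1 ≥ 3 then true else pvG c (r + 1) t := by
  simp only [pvG, if_pos hc, if_pos h]

-- the invariant: pvG from reachable states computes pvHasPat with the right context
lemma pvG_spec (l : List Int) :
    pvG 0 0 l = pvHasPat l ∧
    (∀ p : Int, (p = 1 ∨ p = 2) → pvG p 1 l = pvHasPat (p :: l)) ∧
    (∀ q : Int, (q = 1 ∨ q = 2) → pvG q 2 l = pvHasPat ((3 - q) :: q :: l)) := by
  induction l with
  | nil =>
    refine ⟨rfl, fun p hp => ?_, fun q hq => ?_⟩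
    · rcases hp with h | h <;> subst h <;> rfl
    · rcases hq with h | h <;> subst h <;> rfl
  | cons c t ih =>
    obtain ⟨ih0, ih1, ih2⟩ := ih
    by_cases hc : c = 1 ∨ c = 2
    · refine ⟨?_, ?_, ?_⟩
      · -- from the empty context
        rw [pvG_cons_new 0 0 c t hc (by simp)]
        exact ih1 c hc
      · -- after one element p of an alternating run
        intro p hp
        by_cases hcp : c = p
        · subst hcp
          rw [pvG_cons_new c 1 c t hc (by simp), pvHasPat_cons_same]
          exact ih1 c hc
        · have hp0 : p ≠ 0 := by rcases hp with h | h <;> omega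
          rw [pvG_cons_inc p 1 c t hc ⟨hp0, hcp⟩, if_neg (by norm_num)]
          have h3c : p = 3 - c := by rcases hp with h | h <;> rcases hc with h' | h' <;> omega
          rw [h3c]
          exact ih2 c hc
      · -- after two alternating elements 3-q, q
        intro q hq
        by_cases hcq : c = q
        · subst hcq
          rw [pvG_cons_new c 2 c t hc (by simp),
              pvHasPat_step (3 - c) c c t (by rintro ⟨-, h1, h2⟩; omega)
                (by rintro ⟨-, h1, h2⟩; omega),
              pvHasPat_cons_same]
          exact ih1 c hc
        · have hq0 : q ≠ 0 := by rcases hq with h | h <;> omega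
          rw [pvG_cons_inc q 2 c t hc ⟨hq0, hcq⟩, if_pos (by norm_num)]
          have hcq3 : c = 3 - q := by rcases hq with h | h <;> rcases hc with h' | h' <;> omega
          rcases hq with h | h <;> subst h <;>
          · rw [hcq3]; simp [pvHasPat]
    · have hc' : ¬ (c = 1 ∨ c = 2) := hc
      replace hc : c ≠ 1 ∧ c ≠ 2 := ⟨fun h => hc' (Or.inl h), fun h => hc' (Or.inr h)⟩
      refine ⟨?_, ?_, ?_⟩
      · rw [pvG_cons_non 0 0 c t hc', pvHasPat_cons_nonpat c t hc.1 hc.2]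
        exact ih0
      · intro p hp
        rw [pvG_cons_non p 1 c t hc', pvHasPat_cons_mid p c t hc.1 hc.2,
            pvHasPat_cons_nonpat c t hc.1 hc.2]
        exact ih0
      · intro q hq
        rw [pvG_cons_non q 2 c t hc',
            pvHasPat_step (3 - q) q c t (by rintro ⟨-, -, h⟩; exact hc.1 h)
              (by rintro ⟨-, -, h⟩; exact hc.2 h),
            pvHasPat_cons_mid q c t hc.1 hc.2, pvHasPat_cons_nonpat c t hc.1 hc.2]
        exact ih0

-- B's fold: once found, the state is frozen
lemma pv_fold_found (l : List (List Int)) (s : Bool × Int × Int) (h : s.1 = true) :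
    l.foldl pvStepB s = s := by
  induction l with
  | nil => rfl
  | cons a t ih => rw [List.foldl_cons, pvStepB, if_pos h]; exact ih

-- B's fold equals pvG on the counts list
lemma pv_fold_eq_pvG (l : List (List Int)) (p r : Int) :
    (l.foldl pvStepB (false, p, r)).1 = pvG p r (l.map (fun a => (a.length : Int))) := by
  induction l generalizing p r with
  | nil => rfl
  | cons a t ih =>
    rw [List.foldl_cons, List.map_cons]
    by_cases hc : ((a.length : Int)) = 1 ∨ ((a.length : Int)) = 2
    · by_cases hp : p ≠ 0 ∧ ((a.length : Int)) ≠ p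
      · rw [pvG_cons_inc p r _ _ hc hp]
        by_cases hr : r + 1 ≥ 3
        · have hstep : pvStepB (false, p, r) a = (true, (a.length : Int), r + 1) := by
            simp only [pvStepB, if_pos hc, if_pos hp]
            simp [hr]
          rw [hstep, pv_fold_found t _ rfl, if_pos hr]
        · have hstep : pvStepB (false, p, r) a = (false, (a.length : Int), r + 1) := by
            simp only [pvStepB, if_pos hc, if_pos hp]
            simp [hr]
          rw [hstep, if_neg hr]
          exact ih _ _
      · rw [pvG_cons_new p r _ _ hc hp]
        have hstep : pvStepB (false, p, r) a = (false, (a.length : Int), 1) := by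
          simp only [pvStepB, if_pos hc, if_neg hp]
          norm_num
        rw [hstep]
        exact ih _ _
    · rw [pvG_cons_non p r _ _ hc]
      have hstep : pvStepB (false, p, r) a = (false, 0, 0) := by
        simp only [pvStepB, if_neg hc]
        rfl
      rw [hstep]
      exact ih _ _

-- ===== VERDICT (by name: the statement is the Claim_ definition above) =====
theorem is_candle_spec : Claim_equal_is_candle := by
  intro al _
  unfold Spec_is_candle
  have hB : is_candle_alt al = pvHasPat (al.map (fun a => (a.length : Int))) := by
    unfold is_candle_alt
    rw [pv_fold_eq_pvG]
    exact (pvG_spec _).1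
  rw [Bool.eq_iff_iff, pv_A_iff, hB, pv_hasPat_iff]
  unfold pvP
  constructor <;> rintro ⟨j, hj⟩ <;> refine ⟨j, ?_⟩ <;>
    simpa [List.map_take, List.map_drop] using hj
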